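-- pv_equiv track=rewrite | github.com/Robot-Will/Stino | libs/base_utils/c_file.py | insert_semicolon_break
-- ===== SOURCE A (Python) =====
-- def insert_semicolon_break(words_list):
--     """Doc."""
--     new_words_list = []
--     for words in words_list:
--         new_words = []
--         in_for = False
--         semicolon_counter = 0
--         for index, word in enumerate(words):
--             next_word = ''
--             if index + 1 < len(words):
--                 next_word = words[index + 1]
--
--             new_words.append(word)
--             if not in_for:
--                 if word == ';' and next_word[:2] != '//':
--                     new_words_list.append(new_words)
--                     new_words = []
--                 if word == 'for':
--                     in_for = True
--             else:
--                 if word == ';':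
--                     semicolon_counter += 1
--                 if semicolon_counter == 2:
--                     in_for = False
--                     semicolon_counter = 0
--         new_words_list.append(new_words)
--     return new_words_list
-- ===== SOURCE B (Python) =====
-- def insert_semicolon_break(words_list):
--     """Two-pass re-implementation: record splitting semicolon indices, then slice."""
--     new_words_list = []
--     for words in words_list:
--         breaks = []
--         in_for = False
--         semicolon_counter = 0
--         for index, word in enumerate(words):
--             if not in_for:
--                 if word == ';' and not (index + 1 < len(words)
--                                         and words[index + 1].startswith('//')):
--                     breaks.append(index)
--                 elif word == 'for':
--                     in_for = True
--             else:
--                 if word == ';':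
--                     semicolon_counter += 1
--                 if semicolon_counter == 2:
--                     in_for = False
--                     semicolon_counter = 0
--         prev = 0
--         for b in breaks:
--             new_words_list.append(words[prev:b + 1])
--             prev = b + 1
--         new_words_list.append(words[prev:])
--     return new_words_list
-- ===== Notes on version B (the rewrite author's own statement) =====
-- stated objective: alternative
-- what changed: Instead of accumulating the current chunk token by token and flushing it at each splitting semicolon, B runs the in_for state machine once only to record the indices of the splitting semicolons and then builds the chunks in a second pass by slicing the token list at those indices.
import Mathlib
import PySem

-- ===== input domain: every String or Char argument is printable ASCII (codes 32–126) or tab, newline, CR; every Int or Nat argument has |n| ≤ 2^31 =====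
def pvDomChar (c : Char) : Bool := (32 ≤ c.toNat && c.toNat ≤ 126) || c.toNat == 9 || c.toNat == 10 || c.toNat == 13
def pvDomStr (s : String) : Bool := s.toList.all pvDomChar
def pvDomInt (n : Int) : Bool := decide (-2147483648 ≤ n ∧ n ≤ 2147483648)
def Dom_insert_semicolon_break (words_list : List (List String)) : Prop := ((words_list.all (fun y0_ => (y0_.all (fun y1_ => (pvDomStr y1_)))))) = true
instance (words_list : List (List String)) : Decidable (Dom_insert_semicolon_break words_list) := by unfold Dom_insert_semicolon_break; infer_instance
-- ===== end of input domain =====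

-- B is an alternative decomposition (same asymptotic cost): a first pass records the indices of the
-- splitting semicolons with the same in_for state machine, and a second pass slices the token list
-- at those indices instead of accumulating a current chunk token by token.

-- ===== PORT A =====
-- one iteration of A's inner 'for index, word in enumerate(words)' loop
def stepA (words : List String) (st : List (List String) × List String × Bool × Int)
    (iw : Int × String) : List (List String) × List String × Bool × Int :=
  let nwl := st.1; let nw := st.2.1; let in_for := st.2.2.1; let cnt := st.2.2.2
  let index := iw.1; let word := iw.2
  let next_word := if index + 1 < PySem.List.len words then PySem.List.pyGetD words (index + 1) "" else ""
  let nw := nw ++ [word]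
  if !in_for then
    -- 'if word == ';' and next_word[:2] != '//': append new_words; new_words = []'
    let p := if word = ";" ∧ PySem.Str.slice next_word none (some 2) ≠ "//" then (nwl ++ [nw], ([] : List String)) else (nwl, nw)
    (p.1, p.2, (if word = "for" then true else in_for), cnt)
  else
    let cnt := if word = ";" then cnt + 1 else cnt
    if cnt = 2 then (nwl, nw, false, (0 : Int)) else (nwl, nw, in_for, cnt)

def insert_semicolon_break (words_list : List (List String)) : List (List String) :=
  words_list.foldl (fun new_words_list words =>
    let r := (PySem.List.enumerate words 0).foldl (stepA words) (new_words_list, ([] : List String), false, (0 : Int))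
    r.1 ++ [r.2.1]) []

-- ===== PORT B =====
-- one iteration of B's first pass: record splitting indices, same state machine
def stepB (words : List String) (st : List Int × Bool × Int) (iw : Int × String) : List Int × Bool × Int :=
  let breaks := st.1; let in_for := st.2.1; let cnt := st.2.2
  let index := iw.1; let word := iw.2
  if !in_for then
    if word = ";" ∧ ¬ (index + 1 < PySem.List.len words ∧ PySem.Str.startswith (PySem.List.pyGetD words (index + 1) "") "//" = true) then
      (breaks ++ [index], in_for, cnt)
    else if word = "for" then (breaks, true, cnt)
    else (breaks, in_for, cnt)
  else
    let cnt := if word = ";" then cnt + 1 else cnt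
    if cnt = 2 then (breaks, false, (0 : Int)) else (breaks, in_for, cnt)

def insert_semicolon_break_alt (words_list : List (List String)) : List (List String) :=
  words_list.foldl (fun new_words_list words =>
    let r := (PySem.List.enumerate words 0).foldl (stepB words) (([] : List Int), false, (0 : Int))
    -- second pass: 'for b in breaks: append(words[prev:b+1]); prev = b+1' then 'append(words[prev:])'
    let p := r.1.foldl (fun (q : List (List String) × Int) b =>
      (q.1 ++ [PySem.List.slice words (some q.2) (some (b + 1))], b + 1)) (new_words_list, (0 : Int))
    p.1 ++ [PySem.List.slice words (some p.2) none]) []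

-- ===== PRECONDITION & SPEC =====
def Spec_insert_semicolon_break (words_list : List (List String)) (out : List (List String)) : Prop := out = insert_semicolon_break_alt words_list
instance (words_list : List (List String)) (out : List (List String)) : Decidable (Spec_insert_semicolon_break words_list out) := by unfold Spec_insert_semicolon_break; infer_instance

-- ===== CLAIM (what is proved, stated in full; the proofs are below) =====
def Claim_equal_insert_semicolon_break : Prop := ∀ (words_list : List (List String)), Dom_insert_semicolon_break words_list → Spec_insert_semicolon_break words_list (insert_semicolon_break words_list)

-- ===== LEMMAS AND PROOFS =====

-- prepend a (possibly empty) partial chunk to the head of a chunk list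
def consHead (p : List String) : List (List String) → List (List String)
  | [] => [p]
  | h :: t => (p ++ h) :: t

-- the chunk list produced for one token list from state (f, c), lookahead = head of the rest
def chunks : List String → Bool → Int → List (List String)
  | [], _, _ => [[]]
  | w :: rest, f, c =>
    if f then
      let c' := if w = ";" then c + 1 else c
      if c' = 2 then consHead [w] (chunks rest false 0)
      else consHead [w] (chunks rest f c')
    else
      if w = ";" ∧ PySem.Str.startswith (rest.headD "") "//" = false then
        [w] :: chunks rest false c
      else consHead [w] (chunks rest (if w = "for" then true else f) c)

-- the (0-based) indices at which a split happens, from position k in state (f, c)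
def breaksF : List String → Nat → Bool → Int → List Nat
  | [], _, _, _ => []
  | w :: rest, k, f, c =>
    if f then
      let c' := if w = ";" then c + 1 else c
      if c' = 2 then breaksF rest (k + 1) false 0
      else breaksF rest (k + 1) f c'
    else
      if w = ";" ∧ PySem.Str.startswith (rest.headD "") "//" = false then
        k :: breaksF rest (k + 1) false c
      else breaksF rest (k + 1) (if w = "for" then true else f) c

-- the chunk list obtained by slicing words at the given break indices, starting at position k
def sliceChunks (words : List String) : Nat → List Nat → List (List String)
  | k, [] => [words.drop k]
  | k, b :: bs => ((words.drop k).take (b + 1 - k)) :: sliceChunks words (b + 1) bs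

lemma consHead_ne_nil (p : List String) (cs : List (List String)) : consHead p cs ≠ [] := by
  cases cs <;> simp [consHead]

lemma chunks_true (w : String) (rest : List String) (c : Int) :
    chunks (w :: rest) true c =
      if (if w = ";" then c + 1 else c) = 2 then consHead [w] (chunks rest false 0)
      else consHead [w] (chunks rest true (if w = ";" then c + 1 else c)) := rfl

lemma chunks_false (w : String) (rest : List String) (c : Int) :
    chunks (w :: rest) false c =
      if w = ";" ∧ PySem.Str.startswith (rest.headD "") "//" = false then [w] :: chunks rest false c
      else consHead [w] (chunks rest (if w = "for" then true else false) c) := rfl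

lemma breaksF_true (w : String) (rest : List String) (k : Nat) (c : Int) :
    breaksF (w :: rest) k true c =
      if (if w = ";" then c + 1 else c) = 2 then breaksF rest (k + 1) false 0
      else breaksF rest (k + 1) true (if w = ";" then c + 1 else c) := rfl

lemma breaksF_false (w : String) (rest : List String) (k : Nat) (c : Int) :
    breaksF (w :: rest) k false c =
      if w = ";" ∧ PySem.Str.startswith (rest.headD "") "//" = false then k :: breaksF rest (k + 1) false c
      else breaksF rest (k + 1) (if w = "for" then true else false) c := rfl

lemma chunks_ne_nil (ws : List String) (f : Bool) (c : Int) : chunks ws f c ≠ [] := by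
  cases ws with
  | nil => simp [chunks]
  | cons w rest =>
      cases f with
      | false =>
          rw [chunks_false]
          split_ifs <;> first | exact consHead_ne_nil _ _ | simp
      | true =>
          rw [chunks_true]
          split_ifs <;> exact consHead_ne_nil _ _

lemma consHead_nil (cs : List (List String)) (h : cs ≠ []) : consHead [] cs = cs := by
  cases cs with
  | nil => exact absurd rfl h
  | cons a t => simp [consHead]

lemma consHead_consHead (a b : List String) (cs : List (List String)) :
    consHead a (consHead b cs) = consHead (a ++ b) cs := by
  cases cs <;> simp [consHead]

-- A's 'next_word[:2] != "//"' is exactly '¬ startswith(next_word, "//")'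
lemma slice2_eq_iff (s : String) : (PySem.Str.slice s none (some 2) = "//") ↔ (PySem.Str.startswith s "//" = true) := by
  have h1 : (PySem.Str.slice s none (some 2)).toList = s.toList.take 2 := by simp [pysem]
  rw [← String.toList_inj, h1]
  have h2 : PySem.Str.startswith s "//" = true ↔ ("//".toList) <+: s.toList := by
    simp [pysem, PySem.Chars.startswith_iff]
  have h3 : "//".toList.length = 2 := by decide
  rw [h2, List.prefix_iff_eq_take, h3]
  exact ⟨fun h => h.symm, fun h => h.symm⟩

-- facts about position k when words.drop k = w :: rest
lemma drop_succ_of_drop_cons {words rest : List String} {w : String} {k : Nat}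
    (h : words.drop k = w :: rest) : words.drop (k + 1) = rest := by
  have := congrArg (List.drop 1) h
  rw [List.drop_drop] at this
  simpa using this

lemma length_of_drop_cons {words rest : List String} {w : String} {k : Nat}
    (h : words.drop k = w :: rest) : words.length = k + rest.length + 1 := by
  have h1 := congrArg List.length h
  simp [List.length_drop] at h1
  have h2 : k ≤ words.length := by
    by_contra hk
    have : words.drop k = [] := List.drop_eq_nil_of_le (by omega)
    rw [this] at h; exact absurd h (by simp)
  omega

-- A's next_word at position k equals rest.headD ""
lemma next_word_eq {words rest : List String} {w : String} {k : Nat}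
    (h : words.drop k = w :: rest) :
    (if (k : Int) + 1 < PySem.List.len words then PySem.List.pyGetD words ((k : Int) + 1) "" else "")
      = rest.headD "" := by
  have hlen := length_of_drop_cons h
  have hget : words[k + 1]? = rest[0]? := by
    rw [← List.getElem?_drop, h]
    simp
  have hcast : (k : Int) + 1 = ((k + 1 : Nat) : Int) := by push_cast; ring
  rw [hcast]
  cases rest with
  | nil =>
      have hnl : ¬ (((k + 1 : Nat) : Int) < PySem.List.len words) := by
        simp [pysem, hlen]
      rw [if_neg hnl]
      rfl
  | cons r0 rs =>
      have hlt : ((k + 1 : Nat) : Int) < PySem.List.len words := by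
        simp [pysem, hlen]; try omega
      rw [if_pos hlt, PySem.List.pyGetD_natCast]
      simp [List.getD, hget]

-- B's split condition at position k equals the one in chunks/breaksF
lemma condB_eq {words rest : List String} {w : String} {k : Nat}
    (h : words.drop k = w :: rest) :
    ((w = ";" ∧ ¬ ((k : Int) + 1 < PySem.List.len words ∧
        PySem.Str.startswith (PySem.List.pyGetD words ((k : Int) + 1) "") "//" = true))
      ↔ (w = ";" ∧ PySem.Str.startswith (rest.headD "") "//" = false)) := by
  have hlen := length_of_drop_cons h
  have hget : words[k + 1]? = rest[0]? := by
    rw [← List.getElem?_drop, h]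
    simp
  have hcast : (k : Int) + 1 = ((k + 1 : Nat) : Int) := by push_cast; ring
  rw [hcast]
  cases rest with
  | nil =>
      have hnl : ¬ (((k + 1 : Nat) : Int) < PySem.List.len words) := by simp [pysem, hlen]
      exact ⟨fun hx => ⟨hx.1, by decide⟩, fun hx => ⟨hx.1, fun hc => hnl hc.1⟩⟩
  | cons r0 rs =>
      have hlt : ((k + 1 : Nat) : Int) < PySem.List.len words := by simp [pysem, hlen]; try omega
      have hgd : PySem.List.pyGetD words ((k + 1 : Nat) : Int) "" = r0 := by
        rw [PySem.List.pyGetD_natCast]; simp [List.getD, hget]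
      have hd : ((r0 :: rs).headD "") = r0 := rfl
      rw [hd]
      constructor
      · rintro ⟨h1, h2⟩
        refine ⟨h1, ?_⟩
        rcases Bool.eq_false_or_eq_true (PySem.Str.startswith r0 "//") with hb | hb
        · exact absurd ⟨hlt, by rw [hgd]; exact hb⟩ h2
        · exact hb
      · rintro ⟨h1, h2⟩
        refine ⟨h1, fun hc => ?_⟩
        rw [hgd] at hc
        rw [hc.2] at h2
        exact absurd h2 (by simp)

-- A's split condition at position k equals the one in chunks/breaksF
lemma condA_eq {words rest : List String} {w : String} {k : Nat}
    (h : words.drop k = w :: rest) :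
    ((w = ";" ∧ PySem.Str.slice (if (k : Int) + 1 < PySem.List.len words then PySem.List.pyGetD words ((k : Int) + 1) "" else "") none (some 2) ≠ "//")
      ↔ (w = ";" ∧ PySem.Str.startswith (rest.headD "") "//" = false)) := by
  rw [next_word_eq h]
  constructor
  · rintro ⟨h1, h2⟩
    refine ⟨h1, ?_⟩
    rcases Bool.eq_false_or_eq_true (PySem.Str.startswith (rest.headD "") "//") with hb | hb
    · exact absurd ((slice2_eq_iff _).2 hb) h2
    · exact hb
  · rintro ⟨h1, h2⟩
    refine ⟨h1, fun hc => ?_⟩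
    rw [(slice2_eq_iff _).1 hc] at h2
    exact absurd h2 (by simp)

-- one-step equations for the ports' loop bodies
lemma stepA_false (words : List String) (acc : List (List String)) (cur : List String) (c : Int) (i : Int) (w : String) :
    stepA words (acc, cur, false, c) (i, w) =
      if w = ";" ∧ PySem.Str.slice (if i + 1 < PySem.List.len words then PySem.List.pyGetD words (i + 1) "" else "") none (some 2) ≠ "//"
      then (acc ++ [cur ++ [w]], ([] : List String), (if w = "for" then true else false), c)
      else (acc, cur ++ [w], (if w = "for" then true else false), c) := by
  simp only [stepA]
  by_cases h1 : (w = ";" ∧ PySem.Str.slice (if i + 1 < PySem.List.len words then PySem.List.pyGetD words (i + 1) "" else "") none (some 2) ≠ "//") <;>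
    by_cases h2 : w = "for" <;> (try simp [h1, h2]) <;> (try split_ifs) <;> simp_all

lemma stepA_true (words : List String) (acc : List (List String)) (cur : List String) (c : Int) (i : Int) (w : String) :
    stepA words (acc, cur, true, c) (i, w) =
      (acc, cur ++ [w], (if (if w = ";" then c + 1 else c) = 2 then false else true),
        (if (if w = ";" then c + 1 else c) = 2 then 0 else (if w = ";" then c + 1 else c))) := by
  simp only [stepA]
  split_ifs <;> simp_all

lemma stepB_false (words : List String) (bs : List Int) (c : Int) (i : Int) (w : String) :
    stepB words (bs, false, c) (i, w) =
      if w = ";" ∧ ¬ (i + 1 < PySem.List.len words ∧ PySem.Str.startswith (PySem.List.pyGetD words (i + 1) "") "//" = true)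
      then (bs ++ [i], false, c)
      else (bs, (if w = "for" then true else false), c) := by
  simp only [stepB]
  by_cases h1 : (w = ";" ∧ ¬ (i + 1 < PySem.List.len words ∧ PySem.Str.startswith (PySem.List.pyGetD words (i + 1) "") "//" = true)) <;>
    by_cases h2 : w = "for" <;> simp [h1, h2]

lemma stepB_true (words : List String) (bs : List Int) (c : Int) (i : Int) (w : String) :
    stepB words (bs, true, c) (i, w) =
      (bs, (if (if w = ";" then c + 1 else c) = 2 then false else true),
        (if (if w = ";" then c + 1 else c) = 2 then 0 else (if w = ";" then c + 1 else c))) := by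
  simp only [stepB]
  split_ifs <;> simp_all

-- A's inner fold computes acc ++ consHead cur (chunks ws f c)
lemma A_fold (words : List String) (ws : List String) : ∀ (k : Nat), words.drop k = ws →
    ∀ (acc : List (List String)) (cur : List String) (f : Bool) (c : Int),
    (((PySem.List.enumerate ws (k : Int)).foldl (stepA words) (acc, cur, f, c)).1
      ++ [((PySem.List.enumerate ws (k : Int)).foldl (stepA words) (acc, cur, f, c)).2.1])
      = acc ++ consHead cur (chunks ws f c) := by
  induction ws with
  | nil =>
      intro k h acc cur f c
      simp [PySem.List.enumerate_nil, chunks, consHead]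
  | cons w rest ih =>
      intro k h acc cur f c
      rw [PySem.List.enumerate_cons, List.foldl_cons]
      have hcast : (k : Int) + 1 = ((k + 1 : Nat) : Int) := by push_cast; ring
      have hdrop := drop_succ_of_drop_cons h
      by_cases hf : f
      · -- in_for branch
        subst hf
        show _ = acc ++ consHead cur (chunks (w :: rest) true c)
        rw [stepA_true]
        by_cases hc2 : (if w = ";" then c + 1 else c) = 2
        · simp only [hc2, if_pos]
          rw [hcast, ih (k + 1) hdrop]
          rw [chunks_true, if_pos hc2, consHead_consHead]
        · simp only [if_neg hc2]
          rw [hcast, ih (k + 1) hdrop]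
          rw [chunks_true, if_neg hc2, consHead_consHead]
      · -- not in_for
        have hf' : f = false := by simpa using hf
        subst hf'
        by_cases hsplit : (w = ";" ∧ PySem.Str.startswith (rest.headD "") "//" = false)
        · have hA : (w = ";" ∧ PySem.Str.slice (if (k : Int) + 1 < PySem.List.len words then PySem.List.pyGetD words ((k : Int) + 1) "" else "") none (some 2) ≠ "//") :=
            (condA_eq h).2 hsplit
          have hwfor : ¬ (w = "for") := by rw [hsplit.1]; decide
          rw [stepA_false, if_pos hA, if_neg hwfor, hcast, ih (k + 1) hdrop]
          rw [chunks_false, if_pos hsplit, consHead_nil _ (chunks_ne_nil _ _ _)]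
          cases hcs : chunks rest false c with
          | nil => exact absurd hcs (chunks_ne_nil _ _ _)
          | cons h0 t => simp [consHead]
        · have hA : ¬ (w = ";" ∧ PySem.Str.slice (if (k : Int) + 1 < PySem.List.len words then PySem.List.pyGetD words ((k : Int) + 1) "" else "") none (some 2) ≠ "//") :=
            fun hc => hsplit ((condA_eq h).1 hc)
          rw [stepA_false, if_neg hA, hcast, ih (k + 1) hdrop]
          rw [chunks_false, if_neg hsplit, consHead_consHead]

-- B's first pass computes the break indices breaksF
lemma B_fold (words : List String) (ws : List String) : ∀ (k : Nat), words.drop k = ws →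
    ∀ (bs : List Int) (f : Bool) (c : Int),
    ((PySem.List.enumerate ws (k : Int)).foldl (stepB words) (bs, f, c)).1
      = bs ++ (breaksF ws k f c).map (fun n : Nat => (n : Int)) := by
  induction ws with
  | nil =>
      intro k h bs f c
      simp [PySem.List.enumerate_nil, breaksF]
  | cons w rest ih =>
      intro k h bs f c
      rw [PySem.List.enumerate_cons, List.foldl_cons]
      have hcast : (k : Int) + 1 = ((k + 1 : Nat) : Int) := by push_cast; ring
      have hdrop := drop_succ_of_drop_cons h
      by_cases hf : f
      · subst hf
        rw [stepB_true]
        by_cases hc2 : (if w = ";" then c + 1 else c) = 2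
        · simp only [hc2, if_pos]
          rw [hcast, ih (k + 1) hdrop]
          rw [breaksF_true, if_pos hc2]
        · simp only [if_neg hc2]
          rw [hcast, ih (k + 1) hdrop]
          rw [breaksF_true, if_neg hc2]
      · have hf' : f = false := by simpa using hf
        subst hf'
        by_cases hsplit : (w = ";" ∧ PySem.Str.startswith (rest.headD "") "//" = false)
        · have hB := (condB_eq h).2 hsplit
          rw [stepB_false, if_pos hB, hcast, ih (k + 1) hdrop]
          rw [breaksF_false, if_pos hsplit]
          simp [List.append_assoc]
        · have hB : ¬ (w = ";" ∧ ¬ ((k : Int) + 1 < PySem.List.len words ∧ PySem.Str.startswith (PySem.List.pyGetD words ((k : Int) + 1) "") "//" = true)) :=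
            fun hc => hsplit ((condB_eq h).1 hc)
          rw [stepB_false, if_neg hB, hcast, ih (k + 1) hdrop]
          rw [breaksF_false, if_neg hsplit]

-- B's second pass over break indices computes sliceChunks
lemma slice_fold (words : List String) (bs : List Nat) : ∀ (nwl : List (List String)) (p : Nat),
    (((bs.map (fun n : Nat => (n : Int))).foldl (fun (q : List (List String) × Int) b =>
        (q.1 ++ [PySem.List.slice words (some q.2) (some (b + 1))], b + 1)) (nwl, (p : Int))).1
      ++ [PySem.List.slice words (some ((bs.map (fun n : Nat => (n : Int))).foldl (fun (q : List (List String) × Int) b =>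
        (q.1 ++ [PySem.List.slice words (some q.2) (some (b + 1))], b + 1)) (nwl, (p : Int))).2) none])
      = nwl ++ sliceChunks words p bs := by
  induction bs with
  | nil =>
      intro nwl p
      simp [sliceChunks, PySem.List.slice_from_natCast]
  | cons b bs ih =>
      intro nwl p
      have hcast : ((b : Int)) + 1 = ((b + 1 : Nat) : Int) := by push_cast; ring
      rw [List.map_cons, List.foldl_cons, hcast, PySem.List.slice_natCast, ih]
      simp [sliceChunks]

lemma breaksF_ge (ws : List String) : ∀ (k : Nat) (f : Bool) (c : Int),
    ∀ b ∈ breaksF ws k f c, k ≤ b := by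
  induction ws with
  | nil => intro k f c b hb; simp [breaksF] at hb
  | cons w rest ih =>
      intro k f c b hb
      cases f with
      | true =>
          rw [breaksF_true] at hb
          split_ifs at hb <;> exact le_trans (by omega) (ih (k + 1) _ _ b hb)
      | false =>
          rw [breaksF_false] at hb
          split_ifs at hb <;>
            first
              | exact le_trans (by omega) (ih (k + 1) _ _ b hb)
              | ((rcases List.mem_cons.1 hb with h | h) <;>
                  first
                    | omega
                    | exact le_trans (by omega) (ih (k + 1) _ _ b h))

lemma sliceChunks_shift (words : List String) {w : String} {rest : List String} {k : Nat}
    (h : words.drop k = w :: rest) (bs : List Nat) (hb : ∀ b ∈ bs, k + 1 ≤ b) :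
    sliceChunks words k bs = consHead [w] (sliceChunks words (k + 1) bs) := by
  cases bs with
  | nil =>
      simp [sliceChunks, consHead, h, drop_succ_of_drop_cons h]
  | cons b bs =>
      have hkb : k + 1 ≤ b := hb b (by simp)
      have htake : (words.drop k).take (b + 1 - k) = w :: (words.drop (k + 1)).take (b + 1 - (k + 1)) := by
        rw [h, drop_succ_of_drop_cons h]
        have e1 : b + 1 - k = (b - k) + 1 := by omega
        have e2 : b + 1 - (k + 1) = b - k := by omega
        rw [e1, e2, List.take_succ_cons]
      simp [sliceChunks, htake, consHead]

-- slicing at the recorded breaks reproduces the chunk list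
lemma sliceChunks_breaksF (words : List String) (ws : List String) : ∀ (k : Nat), words.drop k = ws →
    ∀ (f : Bool) (c : Int), sliceChunks words k (breaksF ws k f c) = chunks ws f c := by
  induction ws with
  | nil =>
      intro k h f c
      simp [breaksF, sliceChunks, chunks, h]
  | cons w rest ih =>
      intro k h f c
      have hdrop := drop_succ_of_drop_cons h
      by_cases hf : f
      · subst hf
        rw [breaksF_true, chunks_true]
        by_cases hc2 : (if w = ";" then c + 1 else c) = 2
        · rw [if_pos hc2, if_pos hc2]
          rw [sliceChunks_shift words h _ (breaksF_ge rest (k + 1) false 0), ih (k + 1) hdrop]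
        · rw [if_neg hc2, if_neg hc2]
          rw [sliceChunks_shift words h _ (breaksF_ge rest (k + 1) true _), ih (k + 1) hdrop]
      · have hf' : f = false := by simpa using hf
        subst hf'
        rw [breaksF_false, chunks_false]
        by_cases hsplit : (w = ";" ∧ PySem.Str.startswith (rest.headD "") "//" = false)
        · rw [if_pos hsplit, if_pos hsplit]
          unfold sliceChunks
          have htake : (words.drop k).take (k + 1 - k) = [w] := by
            rw [h]
            have : k + 1 - k = 1 := by omega
            simp [this]
          rw [htake, ih (k + 1) hdrop]
        · rw [if_neg hsplit, if_neg hsplit]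
          rw [sliceChunks_shift words h _ (breaksF_ge rest (k + 1) _ c), ih (k + 1) hdrop]

-- both per-token-list bodies compute acc ++ chunks words false 0
lemma per_elem (words : List String) (acc : List (List String)) :
    (fun new_words_list words =>
      let r := (PySem.List.enumerate words 0).foldl (stepA words) (new_words_list, ([] : List String), false, (0 : Int))
      r.1 ++ [r.2.1]) acc words
    = (fun new_words_list words =>
      let r := (PySem.List.enumerate words 0).foldl (stepB words) (([] : List Int), false, (0 : Int))
      let p := r.1.foldl (fun (q : List (List String) × Int) b =>
        (q.1 ++ [PySem.List.slice words (some q.2) (some (b + 1))], b + 1)) (new_words_list, (0 : Int))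
      p.1 ++ [PySem.List.slice words (some p.2) none]) acc words := by
  have h0 : words.drop 0 = words := by simp
  have hA := A_fold words words 0 h0 acc [] false 0
  have hB := B_fold words words 0 h0 [] false 0
  simp only [List.nil_append] at hB
  have hS := slice_fold words (breaksF words 0 false 0) acc 0
  have hcast0 : ((0 : Nat) : Int) = (0 : Int) := by simp
  rw [hcast0] at hA hB hS
  simp only
  rw [hA, hB, hS, sliceChunks_breaksF words words 0 h0 false 0,
    consHead_nil _ (chunks_ne_nil _ _ _)]

-- the two ports agree on every input
lemma ports_eq (words_list : List (List String)) :
    insert_semicolon_break words_list = insert_semicolon_break_alt words_list := by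
  unfold insert_semicolon_break insert_semicolon_break_alt
  induction words_list using List.reverseRecOn with
  | nil => rfl
  | append_singleton wl words ih =>
      rw [List.foldl_append, List.foldl_append, ih]
      simp only [List.foldl_cons, List.foldl_nil]
      exact per_elem words _

-- ===== VERDICT (by name: the statement is the Claim_ definition above) =====
theorem insert_semicolon_break_spec : Claim_equal_insert_semicolon_break := by
  intro words_list _
  exact (ports_eq words_list)
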